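-- pv_equiv track=rewrite | github.com/kss2002/techGiterview | src/backend/app/services/flow_graph_analyzer.py | _find_node_fuzzy
-- ===== SOURCE A (Python) =====
-- from typing import Dict, Any, List, Optional
--
-- def _find_node_fuzzy(name: str, mapping: Dict[str, str]) -> Optional[str]:
--     """Tries to find a node with exact match or partial match"""
--     name = name.replace('/', '.') # Standardize
--
--     # 1. Exact match
--     if name in mapping:
--         return mapping[name]
--
--     # 2. Exact match with index suffix
--     # mapping handles folder->index, so this is covered if name is folder
--
--     # 3. Partial match (submodules)
--     # import a.b.c -> link to a.b if a.b.c not found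
--     parts = name.split('.')
--     for i in range(len(parts)-1, 0, -1):
--         sub = ".".join(parts[:i])
--         if sub in mapping:
--             return mapping[sub]
--
--     return None
-- ===== SOURCE B (Python) =====
-- from typing import Dict, Optional
--
-- def _find_node_fuzzy(name: str, mapping: Dict[str, str]) -> Optional[str]:
--     """Single pass over the mapping: keep the longest key that is the name itself
--     or a dotted prefix of it (i.e. the name starts with the key and the next
--     character is '.')."""
--     name = name.replace('/', '.')  # Standardize
--     best = None
--     best_len = -1
--     for key, val in mapping.items():
--         if len(key) > best_len and (key == name or (name.startswith(key) and name[len(key)] == '.')):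
--             best, best_len = val, len(key)
--     return best
-- ===== Notes on version B (the rewrite author's own statement) =====
-- stated objective: alternative
-- what changed: Instead of generating candidate prefixes from the name and looking each up in the dict, B makes one pass over the mapping's items, keeping the value of the longest key that equals the name or is a dotted prefix of it (name starts with key and the next character is '.'); correctness relies on keys of a given length being a unique prefix of the name.
import Mathlib
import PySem

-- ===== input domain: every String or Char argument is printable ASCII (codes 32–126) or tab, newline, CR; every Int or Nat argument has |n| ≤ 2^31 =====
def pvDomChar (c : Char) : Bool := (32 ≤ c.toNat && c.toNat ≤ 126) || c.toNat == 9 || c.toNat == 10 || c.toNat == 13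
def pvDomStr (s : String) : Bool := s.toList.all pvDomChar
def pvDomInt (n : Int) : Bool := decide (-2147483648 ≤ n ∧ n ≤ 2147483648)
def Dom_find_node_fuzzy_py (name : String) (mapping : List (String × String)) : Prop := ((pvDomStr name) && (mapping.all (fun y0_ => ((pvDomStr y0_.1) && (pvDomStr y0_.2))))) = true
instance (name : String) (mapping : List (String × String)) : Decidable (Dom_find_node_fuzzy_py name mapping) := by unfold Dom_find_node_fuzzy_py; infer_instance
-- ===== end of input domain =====

-- B replaces A's candidate-prefix generation + dict lookups with one pass over the
-- mapping's items, keeping the longest key that is the name or a dotted prefix of it.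


-- shared dict primitive: Python's `k in d` / `d[k]` on the association list (first match)
def pvDictGet? (mapping : List (String × String)) (k : String) : Option String :=
  (mapping.find? (fun p => p.1 == k)).map (·.2)

-- ===== PORT A =====
-- the `for i in range(len(parts)-1, 0, -1): sub = ".".join(parts[:i]); if sub in mapping: return mapping[sub]` loop
def pvLoopA (mapping : List (String × String)) (parts : List String) : List Int → Option String
  | [] => none
  | i :: rest =>
    let sub := PySem.Str.join "." (PySem.List.slice parts none (some i))
    match pvDictGet? mapping sub with
    | some v => some v
    | none => pvLoopA mapping parts rest

def find_node_fuzzy_py (name : String) (mapping : List (String × String)) : Option String :=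
  let name := PySem.Str.replace name "/" "."
  match pvDictGet? mapping name with
  | some v => some v
  | none =>
    -- name.split('.') with the nonempty separator "." (Chars.splitOn is exactly that split)
    let parts : List String := (PySem.Chars.splitOn name.toList ['.']).map String.ofList
    pvLoopA mapping parts (PySem.List.pyRange ((parts.length : Int) - 1) 0 (-1))

-- ===== PORT B =====
-- `key == name or (name.startswith(key) and name[len(key)] == '.')`
def pvCandB (nm k : List Char) : Bool :=
  (k == nm) || (PySem.Chars.startswith nm k && (PySem.List.pyGet? nm (k.length : Int) == some '.'))

-- the body of Source B's `for key, val in mapping.items(): …` with state (best, best_len)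
def pvStepB (nm : List Char) (st : Option String × Int) (kv : String × String) : Option String × Int :=
  if decide (PySem.Str.len kv.1 > st.2) && pvCandB nm kv.1.toList
  then (some kv.2, PySem.Str.len kv.1) else st

def find_node_fuzzy_py_alt (name : String) (mapping : List (String × String)) : Option String :=
  let nm := PySem.Chars.replace name.toList ['/'] ['.']
  (mapping.foldl (pvStepB nm) ((none : Option String), (-1 : Int))).1

-- ===== PRECONDITION & SPEC =====
def Spec_find_node_fuzzy_py (name : String) (mapping : List (String × String)) (out : Option String) : Prop := out = find_node_fuzzy_py_alt name mapping
instance (name : String) (mapping : List (String × String)) (out : Option String) : Decidable (Spec_find_node_fuzzy_py name mapping out) := by unfold Spec_find_node_fuzzy_py; infer_instance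

-- ===== CLAIM (what is proved, stated in full; the proofs are below) =====
def Claim_equal_find_node_fuzzy_py : Prop := ∀ (name : String) (mapping : List (String × String)), Dom_find_node_fuzzy_py name mapping → Spec_find_node_fuzzy_py name mapping (find_node_fuzzy_py name mapping)

-- ===== LEMMAS AND PROOFS =====

-- structural version of split on the single character '.'
def pvSplitD : List Char → List (List Char)
  | [] => [[]]
  | c :: rest => if c = '.' then [] :: pvSplitD rest else (pvSplitD rest).modifyHead (c :: ·)

theorem pvSplitD_ne_nil (cs : List Char) : pvSplitD cs ≠ [] := by
  cases cs with
  | nil => simp [pvSplitD]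
  | cons c rest =>
    simp only [pvSplitD]
    split
    · simp
    · cases h : pvSplitD rest with
      | nil => exact absurd h (pvSplitD_ne_nil rest)
      | cons a t => simp

theorem pvSplitOnGo (fuel : Nat) (l cur : List Char) (acc : List (List Char))
    (hf : l.length ≤ fuel) :
    PySem.Chars.splitOn.go ['.'] fuel l cur acc
      = acc.reverse ++ (pvSplitD l).modifyHead (cur.reverse ++ ·) := by
  induction fuel generalizing l cur acc with
  | zero =>
    have : l = [] := List.eq_nil_of_length_eq_zero (by omega)
    subst this
    rw [PySem.Chars.splitOn.go]
    simp [pvSplitD]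
  | succ fuel ih =>
    cases l with
    | nil =>
      rw [PySem.Chars.splitOn.go] <;> simp [pvSplitD]
    | cons c rest =>
      rw [PySem.Chars.splitOn.go]
      by_cases hc : c = '.'
      · subst hc
        have hpre : ['.'].isPrefixOf ('.' :: rest) = true := by simp [List.isPrefixOf]
        rw [hpre]
        simp only [if_true]
        have hdrop : List.drop ['.'].length ('.' :: rest) = rest := rfl
        rw [hdrop, ih rest [] (cur.reverse :: acc) (by simpa using hf)]
        cases hs : pvSplitD rest with
        | nil => exact absurd hs (pvSplitD_ne_nil rest)
        | cons a t => simp [pvSplitD, hs]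
      · have hp : ['.'].isPrefixOf (c :: rest) = false := by
          simp [List.isPrefixOf]; exact Ne.symm hc
        rw [hp]
        simp only [Bool.false_eq_true, if_false]
        rw [ih rest (c :: cur) acc (by simpa using Nat.le_of_succ_le_succ hf)]
        cases hs : pvSplitD rest with
        | nil => exact absurd hs (pvSplitD_ne_nil rest)
        | cons a t => simp [pvSplitD, hs, hc]

theorem pvSplitOn_eq (cs : List Char) : PySem.Chars.splitOn cs ['.'] = pvSplitD cs := by
  rw [PySem.Chars.splitOn, pvSplitOnGo cs.length.succ cs [] [] (by omega)]
  cases hs : pvSplitD cs with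
  | nil => exact absurd hs (pvSplitD_ne_nil cs)
  | cons a t => simp

-- join '.' ∘ pvSplitD = id
theorem pvJoin_splitD (cs : List Char) : PySem.Chars.join ['.'] (pvSplitD cs) = cs := by
  induction cs with
  | nil => simp [pvSplitD, PySem.Chars.join, List.intercalate]
  | cons c rest ih =>
    simp only [pvSplitD]
    by_cases hc : c = '.'
    · subst hc
      simp only [if_true]
      cases hs : pvSplitD rest with
      | nil => exact absurd hs (pvSplitD_ne_nil rest)
      | cons a t =>
        rw [hs] at ih
        rw [PySem.Chars.join_cons_cons]
        simpa using ih
    · simp only [hc, if_false]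
      cases hs : pvSplitD rest with
      | nil => exact absurd hs (pvSplitD_ne_nil rest)
      | cons a t =>
        rw [hs] at ih
        cases t with
        | nil =>
          simp only [List.modifyHead]
          rw [PySem.Chars.join_singleton] at ih ⊢
          simp [ih]
        | cons b t' =>
          simp only [List.modifyHead]
          rw [PySem.Chars.join_cons_cons] at ih ⊢
          simp [ih]

theorem pvSplitD_dotFree (cs : List Char) : ∀ p ∈ pvSplitD cs, '.' ∉ p := by
  induction cs with
  | nil => simp [pvSplitD]
  | cons c rest ih =>
    intro p hp
    by_cases hc : c = '.'
    · subst hc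
      have hrw : pvSplitD ('.' :: rest) = [] :: pvSplitD rest := by simp [pvSplitD]
      rw [hrw, List.mem_cons] at hp
      rcases hp with rfl | hp
      · simp
      · exact ih p hp
    · simp only [pvSplitD, hc, if_false] at hp
      cases hs : pvSplitD rest with
      | nil => exact absurd hs (pvSplitD_ne_nil rest)
      | cons a t =>
        rw [hs] at hp
        simp only [List.modifyHead, List.mem_cons] at hp
        rcases hp with rfl | hp
        · intro hmem
          rcases List.mem_cons.mp hmem with h | h
          · exact hc h.symm
          · exact ih a (by rw [hs]; simp) h
        · exact ih p (by rw [hs]; simp [hp])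

-- chain of prefix lookups: chain parts k tests '.'.join(parts[:i]) for i = k, k-1, …, 1
def pvChain (mapping : List (String × String)) (parts : List String) : Nat → Option String
  | 0 => none
  | k + 1 =>
    match pvDictGet? mapping (PySem.Str.join "." (parts.take (k + 1))) with
    | some v => some v
    | none => pvChain mapping parts k

theorem pvLoopA_eq_chain (mapping : List (String × String)) (parts : List String) (k : Nat) :
    pvLoopA mapping parts (PySem.List.pyRange (k : Int) 0 (-1)) = pvChain mapping parts k := by
  induction k with
  | zero => rw [PySem.List.pyRange_neg_one_eq_nil (by omega)]; rfl
  | succ k ih =>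
    rw [PySem.List.pyRange_neg_one_cons (by omega)]
    simp only [pvLoopA, pvChain]
    rw [PySem.List.slice_to parts (by omega)]
    have h1 : (((k + 1 : Nat) : Int)).toNat = k + 1 := by omega
    rw [h1]
    have h2 : ((k + 1 : Nat) : Int) - 1 = (k : Int) := by omega
    rw [h2, ih]

theorem pvJoin_mk (ps : List (List Char)) :
    PySem.Str.join "." (ps.map String.ofList) = String.ofList (PySem.Chars.join ['.'] ps) := by
  have h1 := PySem.Str.toList_join "." (ps.map String.ofList)
  have h2 : List.map String.toList (ps.map String.ofList) = ps := by
    simp [List.map_map, Function.comp_def]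
  rw [h2] at h1
  have h3 : ".".toList = ['.'] := rfl
  rw [h3] at h1
  exact String.toList_injective (by rw [h1, String.toList_ofList])

-- try the candidates in order, returning the first one present in the dict
def pvTryCands (mapping : List (String × String)) : List (List Char) → Option String
  | [] => none
  | c :: rest =>
    match pvDictGet? mapping (String.ofList c) with
    | some v => some v
    | none => pvTryCands mapping rest

-- the candidate list of A, longest first: joins of parts.take k, parts.take (k-1), …, parts.take 1
def pvJoinsDesc (ps : List (List Char)) : Nat → List (List Char)
  | 0 => []
  | k + 1 => PySem.Chars.join ['.'] (ps.take (k + 1)) :: pvJoinsDesc ps k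

theorem pvChain_eq_tryCands (mapping : List (String × String)) (ps : List (List Char)) (k : Nat) :
    pvChain mapping (ps.map String.ofList) k = pvTryCands mapping (pvJoinsDesc ps k) := by
  induction k with
  | zero => rfl
  | succ k ih =>
    simp only [pvChain, pvJoinsDesc, pvTryCands, ← List.map_take, pvJoin_mk, ih]

-- join over a split-into-two list
theorem pvJoin_append (xs ys : List (List Char)) (hxs : xs ≠ []) (hys : ys ≠ []) :
    PySem.Chars.join ['.'] (xs ++ ys)
      = PySem.Chars.join ['.'] xs ++ '.' :: PySem.Chars.join ['.'] ys := by
  induction xs with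
  | nil => exact absurd rfl hxs
  | cons x xs ih =>
    cases xs with
    | nil =>
      cases ys with
      | nil => exact absurd rfl hys
      | cons y ys' =>
        rw [show [x] ++ y :: ys' = x :: y :: ys' from rfl,
          PySem.Chars.join_cons_cons, PySem.Chars.join_singleton]
        simp
    | cons x2 xs' =>
      rw [show (x :: x2 :: xs') ++ ys = x :: ((x2 :: xs') ++ ys) from rfl,
        show (x2 :: xs') ++ ys = x2 :: (xs' ++ ys) from rfl,
        PySem.Chars.join_cons_cons,
        show x2 :: (xs' ++ ys) = (x2 :: xs') ++ ys from rfl,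
        ih (by simp), PySem.Chars.join_cons_cons]
      simp

-- join (take j) decomposes at the i-th dot boundary (1 ≤ i < j ≤ len)
theorem pvTakeSplit (ps : List (List Char)) (i j : Nat)
    (h1 : 1 ≤ i) (hij : i < j) (hj : j ≤ ps.length) :
    PySem.Chars.join ['.'] (ps.take j)
      = PySem.Chars.join ['.'] (ps.take i) ++ '.' :: PySem.Chars.join ['.'] ((ps.take j).drop i) := by
  have htt : (ps.take j).take i = ps.take i := by
    rw [List.take_take]; congr 1; omega
  have hxs : ps.take i ≠ [] := by
    have : (ps.take i).length = i := by rw [List.length_take]; omega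
    intro h; rw [h] at this; simp at this; omega
  have hys : (ps.take j).drop i ≠ [] := by
    have : ((ps.take j).drop i).length = j - i := by
      rw [List.length_drop, List.length_take]; omega
    intro h; rw [h] at this; simp at this; omega
  calc PySem.Chars.join ['.'] (ps.take j)
      = PySem.Chars.join ['.'] ((ps.take j).take i ++ (ps.take j).drop i) := by
        rw [List.take_append_drop]
    _ = PySem.Chars.join ['.'] ((ps.take j).take i) ++ '.' :: PySem.Chars.join ['.'] ((ps.take j).drop i) :=
        pvJoin_append _ _ (htt ▸ hxs) hys
    _ = _ := by rw [htt]

theorem pvJoinLen_mono (ps : List (List Char)) (i j : Nat)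
    (h1 : 1 ≤ i) (hij : i < j) (hj : j ≤ ps.length) :
    (PySem.Chars.join ['.'] (ps.take i)).length < (PySem.Chars.join ['.'] (ps.take j)).length := by
  rw [pvTakeSplit ps i j h1 hij hj]
  simp

-- membership in the candidate list
theorem pvMem_joinsDesc (ps : List (List Char)) (k : Nat) (c : List Char) :
    c ∈ pvJoinsDesc ps k ↔ ∃ i, 1 ≤ i ∧ i ≤ k ∧ c = PySem.Chars.join ['.'] (ps.take i) := by
  induction k with
  | zero =>
    simp only [pvJoinsDesc, List.not_mem_nil, false_iff]
    rintro ⟨i, h1, h2, -⟩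
    omega
  | succ k ih =>
    simp only [pvJoinsDesc, List.mem_cons, ih]
    constructor
    · rintro (rfl | ⟨i, h1, h2, rfl⟩)
      · exact ⟨k + 1, by omega, by omega, rfl⟩
      · exact ⟨i, h1, by omega, rfl⟩
    · rintro ⟨i, h1, h2, rfl⟩
      by_cases hik : i = k + 1
      · subst hik; exact Or.inl rfl
      · exact Or.inr ⟨i, h1, by omega, rfl⟩

theorem pvJoinsDesc_pairwise (ps : List (List Char)) (k : Nat) (hk : k ≤ ps.length) :
    (pvJoinsDesc ps k).Pairwise (fun a b => b.length < a.length) := by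
  induction k with
  | zero => simp [pvJoinsDesc]
  | succ k ih =>
    rw [pvJoinsDesc]
    refine List.Pairwise.cons ?_ (ih (by omega))
    intro b hb
    rcases (pvMem_joinsDesc ps k b).mp hb with ⟨i, h1, h2, rfl⟩
    exact pvJoinLen_mono ps i (k + 1) h1 (by omega) hk

-- every candidate satisfies B's test (nm = join ps)
theorem pvCand_join (ps : List (List Char)) (i : Nat) (h1 : 1 ≤ i) (h2 : i ≤ ps.length) :
    pvCandB (PySem.Chars.join ['.'] ps) (PySem.Chars.join ['.'] (ps.take i)) = true := by
  by_cases hin : i = ps.length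
  · subst hin
    rw [List.take_length]
    simp [pvCandB]
  · have hlt : i < ps.length := by omega
    have hsplit := pvTakeSplit ps i ps.length h1 hlt le_rfl
    rw [List.take_length] at hsplit
    rw [pvCandB, hsplit]
    apply Bool.or_eq_true_iff.mpr
    right
    apply Bool.and_eq_true_iff.mpr
    constructor
    · rw [PySem.Chars.startswith_iff]
      exact ⟨_, rfl⟩
    · rw [PySem.List.pyGet?_natCast]
      rw [List.getElem?_append_right le_rfl]
      simp

-- a prefix followed by '.' in a join of dot-free parts is a join of an initial segment
theorem pvPrefixDot (ps : List (List Char)) (hdf : ∀ p ∈ ps, '.' ∉ p) (u v : List Char)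
    (h : PySem.Chars.join ['.'] ps = u ++ '.' :: v) :
    ∃ i, 1 ≤ i ∧ i < ps.length ∧ u = PySem.Chars.join ['.'] (ps.take i) := by
  induction ps generalizing u v with
  | nil =>
    exfalso
    have : ([] : List Char).length = (u ++ '.' :: v).length := by
      rw [← h]; rfl
    simp at this
  | cons p tl ih =>
    cases tl with
    | nil =>
      exfalso
      rw [PySem.Chars.join_singleton] at h
      exact hdf p List.mem_cons_self (h ▸ List.mem_append_right u List.mem_cons_self)
    | cons q rest =>
      rw [PySem.Chars.join_cons_cons] at h
      have h' : u ++ '.' :: v = p ++ '.' :: PySem.Chars.join ['.'] (q :: rest) := by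
        rw [← h]; simp
      rcases Nat.lt_trichotomy u.length p.length with hlt | heq | hgt
      · exfalso
        have hL : (u ++ '.' :: v)[u.length]? = some '.' := by
          rw [List.getElem?_append_right le_rfl]; simp
        rw [h', List.getElem?_append_left hlt] at hL
        have : '.' ∈ p := by
          have := List.getElem?_eq_getElem hlt
          rw [this] at hL
          exact (Option.some.inj hL) ▸ List.getElem_mem hlt
        exact hdf p List.mem_cons_self this
      · obtain ⟨hu, -⟩ := List.append_inj h' heq
        refine ⟨1, le_rfl, by simp, ?_⟩
        rw [hu, List.take_one]
        simp [PySem.Chars.join_singleton]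
      · have hdot : u[p.length]? = some '.' := by
          have hR : (p ++ '.' :: PySem.Chars.join ['.'] (q :: rest))[p.length]? = some '.' := by
            rw [List.getElem?_append_right le_rfl]; simp
          rw [← h', List.getElem?_append_left hgt] at hR
          exact hR
        have hdotget : u[p.length]'hgt = '.' := by
          rw [List.getElem?_eq_getElem hgt] at hdot
          exact Option.some.inj hdot
        have hu : u = u.take p.length ++ '.' :: u.drop (p.length + 1) := by
          conv_lhs => rw [← List.take_append_drop p.length u]
          rw [← List.getElem_cons_drop hgt, hdotget]
        have hlen : (u.take p.length).length = p.length := by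
          rw [List.length_take]; omega
        have h'' : u.take p.length ++ '.' :: (u.drop (p.length + 1) ++ '.' :: v)
            = p ++ '.' :: PySem.Chars.join ['.'] (q :: rest) := by
          rw [← h']
          conv_rhs => rw [hu]
          simp
        obtain ⟨hp, htail⟩ := List.append_inj h'' hlen
        have hJ : PySem.Chars.join ['.'] (q :: rest) = u.drop (p.length + 1) ++ '.' :: v := by
          have := List.cons.inj htail
          exact this.2.symm
        rcases ih (fun x hx => hdf x (List.mem_cons_of_mem p hx)) _ _ hJ with ⟨i, hi1, hi2, hui⟩
        refine ⟨i + 1, by omega, by simp at hi2 ⊢; omega, ?_⟩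
        have htk : (p :: q :: rest).take (i + 1) = p :: (q :: rest).take i := rfl
        rw [htk]
        have hne : ∃ a t, (q :: rest).take i = a :: t := by
          cases hti : (q :: rest).take i with
          | nil =>
            exfalso
            have : ((q :: rest).take i).length = i := by
              rw [List.length_take]; omega
            rw [hti] at this; simp at this; omega
          | cons a t => exact ⟨a, t, rfl⟩
        rcases hne with ⟨a, t, hat⟩
        rw [hat, PySem.Chars.join_cons_cons, ← hat, ← hui]
        conv_lhs => rw [hu, hp]
        simp

-- every key B's test accepts is one of A's candidates (nm = join ps, ps dot-free)
theorem pvCand_complete (ps : List (List Char)) (hdf : ∀ p ∈ ps, '.' ∉ p) (hne : ps ≠ [])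
    (k : List Char) (hk : pvCandB (PySem.Chars.join ['.'] ps) k = true) :
    k ∈ pvJoinsDesc ps ps.length := by
  rw [pvCandB, Bool.or_eq_true_iff] at hk
  have hn1 : 1 ≤ ps.length := by
    cases ps with
    | nil => exact absurd rfl hne
    | cons a t => simp
  rcases hk with hk | hk
  · rw [pvMem_joinsDesc]
    refine ⟨ps.length, hn1, le_rfl, ?_⟩
    rw [List.take_length]
    exact eq_of_beq hk
  · rw [Bool.and_eq_true_iff] at hk
    obtain ⟨hpre, hget⟩ := hk
    rw [PySem.Chars.startswith_iff] at hpre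
    obtain ⟨t, ht⟩ := hpre
    rw [PySem.List.pyGet?_natCast] at hget
    have hget' : (PySem.Chars.join ['.'] ps)[k.length]? = some '.' := eq_of_beq hget
    rw [← ht, List.getElem?_append_right le_rfl, Nat.sub_self] at hget'
    cases t with
    | nil => simp at hget'
    | cons c t' =>
      have hc : c = '.' := by simpa using hget'
      subst hc
      rcases pvPrefixDot ps hdf k t' ht.symm with ⟨i, hi1, hi2, rfl⟩
      rw [pvMem_joinsDesc]
      exact ⟨i, hi1, by omega, rfl⟩

-- if no remaining item can beat the current best length, the fold is inert
theorem pvFoldStay (nm : List Char) (ms : List (String × String)) (st : Option String × Int)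
    (h : ∀ kv ∈ ms, pvCandB nm kv.1.toList = true → PySem.Str.len kv.1 ≤ st.2) :
    ms.foldl (pvStepB nm) st = st := by
  induction ms with
  | nil => rfl
  | cons kv ms ih =>
    have hstep : pvStepB nm st kv = st := by
      rw [pvStepB]
      by_cases hc : pvCandB nm kv.1.toList = true
      · have hle := h kv List.mem_cons_self hc
        rw [PySem.Str.len_eq] at hle
        have hd : decide (PySem.Str.len kv.1 > st.2) = false := by
          rw [PySem.Str.len_eq]; exact decide_eq_false (by omega)
        rw [hd, hc]
        simp
      · rw [Bool.not_eq_true] at hc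
        rw [hc]
        simp
    rw [List.foldl_cons, hstep]
    exact ih (fun kv' h' => h kv' (List.mem_cons_of_mem kv h'))

-- if c is the longest matching key present, the fold returns its first value
theorem pvFoldHit (nm c : List Char) (hc : pvCandB nm c = true) :
    ∀ (ms : List (String × String)) (st : Option String × Int),
    (∃ kv ∈ ms, kv.1.toList = c) →
    (∀ kv ∈ ms, pvCandB nm kv.1.toList = true → kv.1.toList.length < c.length ∨ kv.1.toList = c) →
    st.2 < (c.length : Int) →
    (ms.foldl (pvStepB nm) st).1 = pvDictGet? ms (String.ofList c) := by
  intro ms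
  induction ms with
  | nil => rintro st ⟨kv, hmem, -⟩; simp at hmem
  | cons kv ms ih =>
    rintro st hex hbnd hst
    by_cases hk : kv.1.toList = c
    · have hkey : kv.1 = String.ofList c := by
        rw [← hk, String.ofList_toList]
      have hcand : pvCandB nm kv.1.toList = true := by rw [hk]; exact hc
      have hlen : PySem.Str.len kv.1 = (c.length : Int) := by
        rw [PySem.Str.len_eq, hk]
      have hstep : pvStepB nm st kv = (some kv.2, (c.length : Int)) := by
        rw [pvStepB, hcand, hlen]
        have : decide ((c.length : Int) > st.2) = true := by simp; omega
        rw [this]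
        simp
      rw [List.foldl_cons, hstep]
      rw [pvFoldStay nm ms (some kv.2, (c.length : Int)) ?_]
      · rw [pvDictGet?, List.find?_cons_of_pos (by simp [hkey])]
        rfl
      · intro kv' hmem' hcand'
        rcases hbnd kv' (List.mem_cons_of_mem kv hmem') hcand' with hlt | heq
        · rw [PySem.Str.len_eq]
          show ((kv'.1.toList.length : Int)) ≤ ((c.length : Int))
          omega
        · rw [PySem.Str.len_eq, heq]
    · have hkey : (kv.1 == String.ofList c) = false := by
        apply beq_eq_false_iff_ne.mpr
        intro hq
        exact hk (by rw [hq, String.toList_ofList])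
      have hdict : pvDictGet? (kv :: ms) (String.ofList c)
          = pvDictGet? ms (String.ofList c) := by
        rw [pvDictGet?, pvDictGet?, List.find?_cons_of_neg (by simp [hkey])]
      rw [List.foldl_cons, hdict]
      have hex' : ∃ kv' ∈ ms, kv'.1.toList = c := by
        rcases hex with ⟨kv', hmem', hkc⟩
        rcases List.mem_cons.mp hmem' with rfl | hmem''
        · exact absurd hkc hk
        · exact ⟨kv', hmem'', hkc⟩
      have hbnd' : ∀ kv' ∈ ms, pvCandB nm kv'.1.toList = true →
          kv'.1.toList.length < c.length ∨ kv'.1.toList = c :=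
        fun kv' h' => hbnd kv' (List.mem_cons_of_mem kv h')
      have hst' : (pvStepB nm st kv).2 < (c.length : Int) := by
        rw [pvStepB]
        by_cases hcond : (decide (PySem.Str.len kv.1 > st.2) && pvCandB nm kv.1.toList) = true
        · rw [hcond]
          simp only [if_true]
          have hcand : pvCandB nm kv.1.toList = true := (Bool.and_eq_true_iff.mp hcond).2
          rcases hbnd kv List.mem_cons_self hcand with hlt | heq
          · rw [PySem.Str.len_eq]
            show ((kv.1.toList.length : Int)) < ((c.length : Int))
            omega
          · exact absurd heq hk
        · rw [Bool.not_eq_true] at hcond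
          rw [hcond]
          simpa using hst
      exact ih (pvStepB nm st kv) hex' hbnd' hst'

-- the single fold over the mapping equals trying the (decreasing, complete) candidate list
theorem pvFoldEqTry (nm : List Char) (C : List (List Char)) :
    ∀ (ms : List (String × String)),
    (∀ c ∈ C, pvCandB nm c = true) →
    (∀ kv ∈ ms, pvCandB nm kv.1.toList = true → kv.1.toList ∈ C) →
    C.Pairwise (fun a b => b.length < a.length) →
    (ms.foldl (pvStepB nm) ((none : Option String), (-1 : Int))).1 = pvTryCands ms C := by
  induction C with
  | nil =>
    intro ms _ hcomp _
    rw [pvTryCands, pvFoldStay nm ms _ (fun kv hm hc => absurd (hcomp kv hm hc) (by simp))]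
  | cons c C ih =>
    intro ms hall hcomp hpw
    rw [pvTryCands]
    cases hget : pvDictGet? ms (String.ofList c) with
    | some v =>
      have hex : ∃ kv ∈ ms, kv.1.toList = c := by
        rw [pvDictGet?] at hget
        cases hfind : ms.find? (fun p => p.1 == String.ofList c) with
        | none => rw [hfind] at hget; simp at hget
        | some kv =>
          refine ⟨kv, List.mem_of_find?_eq_some hfind, ?_⟩
          have := List.find?_some hfind
          rw [eq_of_beq this, String.toList_ofList]
      have hbnd : ∀ kv ∈ ms, pvCandB nm kv.1.toList = true →
          kv.1.toList.length < c.length ∨ kv.1.toList = c := by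
        intro kv hm hc'
        rcases List.mem_cons.mp (hcomp kv hm hc') with h | h
        · exact Or.inr h
        · exact Or.inl ((List.pairwise_cons.mp hpw).1 _ h)
      rw [pvFoldHit nm c (hall c List.mem_cons_self) ms _ hex hbnd (by simp; omega), hget]
    | none =>
      have hcomp' : ∀ kv ∈ ms, pvCandB nm kv.1.toList = true → kv.1.toList ∈ C := by
        intro kv hm hc'
        rcases List.mem_cons.mp (hcomp kv hm hc') with h | h
        · exfalso
          rw [pvDictGet?] at hget
          have hfind : ms.find? (fun p => p.1 == String.ofList c) = none := by
            cases hf : ms.find? (fun p => p.1 == String.ofList c) with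
            | none => rfl
            | some kv' => rw [hf] at hget; simp at hget
          have := List.find?_eq_none.mp hfind kv hm
          apply this
          rw [← h, String.ofList_toList]
          exact beq_self_eq_true kv.1
        · exact h
      exact ih ms (fun c' h' => hall c' (List.mem_cons_of_mem c h'))
        hcomp' (List.pairwise_cons.mp hpw).2

-- A equals trying the full candidate list (head = exact match)
theorem pvA_eq_tryCands (name : String) (mapping : List (String × String)) :
    find_node_fuzzy_py name mapping
      = pvTryCands mapping
          (pvJoinsDesc (pvSplitD (PySem.Str.replace name "/" ".").toList)
            (pvSplitD (PySem.Str.replace name "/" ".").toList).length) := by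
  simp only [find_node_fuzzy_py]
  set nm := (PySem.Str.replace name "/" ".").toList with hnm
  set ps := pvSplitD nm with hps
  have hn1 : 1 ≤ ps.length := by
    cases hc : ps with
    | nil => exact absurd hc (pvSplitD_ne_nil nm)
    | cons a t => simp
  obtain ⟨n', hn'⟩ : ∃ n', ps.length = n' + 1 := ⟨ps.length - 1, by omega⟩
  rw [hn', pvJoinsDesc, pvTryCands]
  have hofl : String.ofList (PySem.Chars.join ['.'] (ps.take (n' + 1)))
      = PySem.Str.replace name "/" "." := by
    rw [← hn', List.take_length, hps, pvJoin_splitD, hnm, String.ofList_toList]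
  rw [hofl]
  cases hget : pvDictGet? mapping (PySem.Str.replace name "/" ".") with
  | some v => rfl
  | none =>
    simp only []
    rw [pvSplitOn_eq, ← hps]
    have hlen : ((ps.map String.ofList).length : Int) - 1 = ((n' : Nat) : Int) := by
      rw [List.length_map, hn']; omega
    rw [hlen, pvLoopA_eq_chain, pvChain_eq_tryCands]

-- ===== VERDICT (by name: the statement is the Claim_ definition above) =====
theorem find_node_fuzzy_py_spec : Claim_equal_find_node_fuzzy_py := by
  intro name mapping _
  unfold Spec_find_node_fuzzy_py
  rw [pvA_eq_tryCands]
  simp only [find_node_fuzzy_py_alt]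
  have hrep : PySem.Chars.replace name.toList ['/'] ['.']
      = (PySem.Str.replace name "/" ".").toList := by
    rw [PySem.Str.toList_replace]; rfl
  rw [hrep]
  set nm := (PySem.Str.replace name "/" ".").toList with hnm
  set ps := pvSplitD nm with hps
  have hjoin : PySem.Chars.join ['.'] ps = nm := by rw [hps, pvJoin_splitD]
  have hall : ∀ c ∈ pvJoinsDesc ps ps.length, pvCandB nm c = true := by
    intro c hc
    rcases (pvMem_joinsDesc ps ps.length c).mp hc with ⟨i, h1, h2, rfl⟩
    rw [← hjoin]
    exact pvCand_join ps i h1 h2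
  have hcomp : ∀ kv ∈ mapping, pvCandB nm kv.1.toList = true →
      kv.1.toList ∈ pvJoinsDesc ps ps.length := by
    intro kv _ hc
    rw [← hjoin] at hc
    exact pvCand_complete ps (hps ▸ pvSplitD_dotFree nm) (pvSplitD_ne_nil nm) _ hc
  exact (pvFoldEqTry nm (pvJoinsDesc ps ps.length) mapping hall hcomp
    (pvJoinsDesc_pairwise ps ps.length le_rfl)).symm
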